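-- pv_equiv track=rewrite | github.com/alvin8-git/annovar-fast | gene_annotator.py | _compute_fs_annotation
-- ===== SOURCE A (Python) =====
-- CODON_TABLE = {
--     'TTT': 'F', 'TTC': 'F', 'TTA': 'L', 'TTG': 'L',
--     'CTT': 'L', 'CTC': 'L', 'CTA': 'L', 'CTG': 'L',
--     'ATT': 'I', 'ATC': 'I', 'ATA': 'I', 'ATG': 'M',
--     'GTT': 'V', 'GTC': 'V', 'GTA': 'V', 'GTG': 'V',
--     'TCT': 'S', 'TCC': 'S', 'TCA': 'S', 'TCG': 'S',
--     'CCT': 'P', 'CCC': 'P', 'CCA': 'P', 'CCG': 'P',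
--     'ACT': 'T', 'ACC': 'T', 'ACA': 'T', 'ACG': 'T',
--     'GCT': 'A', 'GCC': 'A', 'GCA': 'A', 'GCG': 'A',
--     'TAT': 'Y', 'TAC': 'Y', 'TAA': 'X', 'TAG': 'X',
--     'CAT': 'H', 'CAC': 'H', 'CAA': 'Q', 'CAG': 'Q',
--     'AAT': 'N', 'AAC': 'N', 'AAA': 'K', 'AAG': 'K',
--     'GAT': 'D', 'GAC': 'D', 'GAA': 'E', 'GAG': 'E',
--     'TGT': 'C', 'TGC': 'C', 'TGA': 'X', 'TGG': 'W',
--     'CGT': 'R', 'CGC': 'R', 'CGA': 'R', 'CGG': 'R',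
--     'AGT': 'S', 'AGC': 'S', 'AGA': 'R', 'AGG': 'R',
--     'GGT': 'G', 'GGC': 'G', 'GGA': 'G', 'GGG': 'G',
-- }
--
-- def translate_dna(seq):
--     """Translate DNA to protein."""
--     seq = seq.upper()
--     protein = []
--     for i in range(0, len(seq) - 2, 3):
--         codon = seq[i:i+3]
--         aa = CODON_TABLE.get(codon, '?')
--         protein.append(aa)
--     return ''.join(protein)
--
-- def _compute_fs_annotation(mrna_seq, refvarstart, refcdsstart, varnt3, fs,
--                            is_del=False, refvarend=None):
--     """Compute detailed frameshift annotation: p.{wtAA}{pos}{mutAA}fs*{dist}.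
--
--     Builds the full mutant mRNA by splicing the variant into the wildtype,
--     translates both from the affected codon, finds the first different AA
--     and the distance to the next stop codon.
--     """
--     wt_codon_start = refvarstart - fs - 1  # 0-based position in mRNA
--     varpos = (refvarstart - refcdsstart) // 3 + 1
--
--     # Build wildtype CDS from affected codon to end of mRNA
--     max_len = min(len(mrna_seq), wt_codon_start + 3000)
--     wt_seq = mrna_seq[wt_codon_start:max_len]
--     wt_protein = translate_dna(wt_seq)
--
--     # Build mutant mRNA by splicing
--     # prefix: wt bases before variant in the affected codon
--     # varnt3 = prefix + inserted/modified bases + suffix from wt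
--     if is_del:
--         # For deletion: the mutant mRNA skips the deleted bases
--         # varnt3 was built from prefix (fs bases) + bases from after deletion
--         # The continuation is the rest of the mRNA after the deletion
--         if refvarend is None:
--             refvarend = refvarstart  # single deletion
--         # Mutant mRNA from this codon = prefix + (mRNA from refvarend onward)
--         prefix = mrna_seq[wt_codon_start:wt_codon_start + fs] if fs > 0 else ''
--         var_full = prefix + mrna_seq[refvarend:max_len]
--     else:
--         # For insertion: varnt3 = modified codon with insertion
--         # The continuation is the rest of the mRNA after the original codon
--         var_full = varnt3 + mrna_seq[wt_codon_start + 3:max_len]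
--
--     var_protein = translate_dna(var_full)
--
--     if not var_protein:
--         return f"p.{wt_protein[0] if wt_protein else '?'}{varpos}fs"
--
--     # Find first mismatch position
--     first_diff = 0
--     min_len = min(len(wt_protein), len(var_protein))
--     for i in range(min_len):
--         if wt_protein[i] != var_protein[i]:
--             first_diff = i
--             break
--     else:
--         first_diff = min_len
--
--     if first_diff >= len(wt_protein) or first_diff >= len(var_protein):
--         return f"p.{wt_protein[0] if wt_protein else '?'}{varpos}fs"
--
--     diff_wt_aa = wt_protein[first_diff]
--     diff_var_aa = var_protein[first_diff]
--     diff_pos = varpos + first_diff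
--
--     # Find distance to next stop codon in variant protein (from first_diff onward)
--     stop_dist = None
--     for i in range(first_diff, len(var_protein)):
--         if var_protein[i] == 'X':
--             stop_dist = i - first_diff + 1
--             break
--
--     if stop_dist is not None:
--         return f"p.{diff_wt_aa}{diff_pos}{diff_var_aa}fs*{stop_dist}"
--     else:
--         return f"p.{diff_wt_aa}{diff_pos}{diff_var_aa}fs"
-- ===== SOURCE B (Python) =====
-- CODON_TABLE = {
--     'TTT': 'F', 'TTC': 'F', 'TTA': 'L', 'TTG': 'L',
--     'CTT': 'L', 'CTC': 'L', 'CTA': 'L', 'CTG': 'L',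
--     'ATT': 'I', 'ATC': 'I', 'ATA': 'I', 'ATG': 'M',
--     'GTT': 'V', 'GTC': 'V', 'GTA': 'V', 'GTG': 'V',
--     'TCT': 'S', 'TCC': 'S', 'TCA': 'S', 'TCG': 'S',
--     'CCT': 'P', 'CCC': 'P', 'CCA': 'P', 'CCG': 'P',
--     'ACT': 'T', 'ACC': 'T', 'ACA': 'T', 'ACG': 'T',
--     'GCT': 'A', 'GCC': 'A', 'GCA': 'A', 'GCG': 'A',
--     'TAT': 'Y', 'TAC': 'Y', 'TAA': 'X', 'TAG': 'X',
--     'CAT': 'H', 'CAC': 'H', 'CAA': 'Q', 'CAG': 'Q',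
--     'AAT': 'N', 'AAC': 'N', 'AAA': 'K', 'AAG': 'K',
--     'GAT': 'D', 'GAC': 'D', 'GAA': 'E', 'GAG': 'E',
--     'TGT': 'C', 'TGC': 'C', 'TGA': 'X', 'TGG': 'W',
--     'CGT': 'R', 'CGC': 'R', 'CGA': 'R', 'CGG': 'R',
--     'AGT': 'S', 'AGC': 'S', 'AGA': 'R', 'AGG': 'R',
--     'GGT': 'G', 'GGC': 'G', 'GGA': 'G', 'GGG': 'G',
-- }
--
-- def _aa(seq, k):
--     """Amino acid of the k-th complete codon of the (already uppercased) sequence."""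
--     return CODON_TABLE.get(seq[3 * k:3 * k + 3], '?')
--
-- def _compute_fs_annotation(mrna_seq, refvarstart, refcdsstart, varnt3, fs,
--                            is_del=False, refvarend=None):
--     """Frameshift annotation, computed codon-by-codon in one fused lazy pass."""
--     wt_codon_start = refvarstart - fs - 1
--     varpos = (refvarstart - refcdsstart) // 3 + 1
--     max_len = min(len(mrna_seq), wt_codon_start + 3000)
--
--     wt = mrna_seq[wt_codon_start:max_len].upper()
--     if is_del:
--         if refvarend is None:
--             refvarend = refvarstart
--         prefix = mrna_seq[wt_codon_start:wt_codon_start + fs] if fs > 0 else ''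
--         var = (prefix + mrna_seq[refvarend:max_len]).upper()
--     else:
--         var = (varnt3 + mrna_seq[wt_codon_start + 3:max_len]).upper()
--
--     n_wt = len(wt) // 3
--     n_var = len(var) // 3
--
--     # fused scan: translate both windows codon-by-codon until the first mismatch
--     p = 0
--     while p < n_wt and p < n_var and _aa(wt, p) == _aa(var, p):
--         p += 1
--
--     if p >= n_wt or p >= n_var:
--         head = _aa(wt, 0) if n_wt > 0 else '?'
--         return "p.%s%dfs" % (head, varpos)
--
--     wt_aa = _aa(wt, p)
--     var_aa = _aa(var, p)
--
--     # continue translating only the variant window until the first stop codon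
--     k = p
--     while k < n_var and _aa(var, k) != 'X':
--         k += 1
--
--     if k < n_var:
--         return "p.%s%d%sfs*%d" % (wt_aa, varpos + p, var_aa, k - p + 1)
--     return "p.%s%d%sfs" % (wt_aa, varpos + p, var_aa)
-- ===== Notes on version B (the rewrite author's own statement) =====
-- stated objective: alternative
-- what changed: Instead of translating both full windows into protein strings and then running separate index-scan loops over them, B translates codon-by-codon in one fused lazy pass: it advances through both windows simultaneously until the first differing amino acid, then keeps translating only the variant window until the first stop codon, never materialising either protein string.
import Mathlib
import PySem

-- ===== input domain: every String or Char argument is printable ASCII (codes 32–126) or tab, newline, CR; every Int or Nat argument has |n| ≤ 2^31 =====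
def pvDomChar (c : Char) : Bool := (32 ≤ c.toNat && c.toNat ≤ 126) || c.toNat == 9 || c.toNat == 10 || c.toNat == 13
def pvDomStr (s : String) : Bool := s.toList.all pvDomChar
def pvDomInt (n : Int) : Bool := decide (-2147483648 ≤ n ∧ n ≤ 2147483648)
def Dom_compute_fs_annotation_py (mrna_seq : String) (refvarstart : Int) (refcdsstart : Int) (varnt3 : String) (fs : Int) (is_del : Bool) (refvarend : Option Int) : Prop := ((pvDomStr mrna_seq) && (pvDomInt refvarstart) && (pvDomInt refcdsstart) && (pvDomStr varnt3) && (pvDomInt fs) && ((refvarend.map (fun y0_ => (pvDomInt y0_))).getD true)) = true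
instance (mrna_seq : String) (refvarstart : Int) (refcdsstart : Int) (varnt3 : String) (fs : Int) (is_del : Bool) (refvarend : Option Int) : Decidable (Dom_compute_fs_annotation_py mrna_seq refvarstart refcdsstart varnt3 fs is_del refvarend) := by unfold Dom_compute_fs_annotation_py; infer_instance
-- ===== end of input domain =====

-- B translates codon-by-codon in one fused lazy pass (mismatch scan, then stop scan on the
-- variant window only) instead of materialising both full proteins first; same return value.

-- ===== PORT A =====
-- module constant CODON_TABLE (shared data, used by both Pythons)
def pvCodonTable : PySem.Dict String String := PySem.Dict.ofList [
  ("TTT", "F"), ("TTC", "F"), ("TTA", "L"), ("TTG", "L"),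
  ("CTT", "L"), ("CTC", "L"), ("CTA", "L"), ("CTG", "L"),
  ("ATT", "I"), ("ATC", "I"), ("ATA", "I"), ("ATG", "M"),
  ("GTT", "V"), ("GTC", "V"), ("GTA", "V"), ("GTG", "V"),
  ("TCT", "S"), ("TCC", "S"), ("TCA", "S"), ("TCG", "S"),
  ("CCT", "P"), ("CCC", "P"), ("CCA", "P"), ("CCG", "P"),
  ("ACT", "T"), ("ACC", "T"), ("ACA", "T"), ("ACG", "T"),
  ("GCT", "A"), ("GCC", "A"), ("GCA", "A"), ("GCG", "A"),
  ("TAT", "Y"), ("TAC", "Y"), ("TAA", "X"), ("TAG", "X"),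
  ("CAT", "H"), ("CAC", "H"), ("CAA", "Q"), ("CAG", "Q"),
  ("AAT", "N"), ("AAC", "N"), ("AAA", "K"), ("AAG", "K"),
  ("GAT", "D"), ("GAC", "D"), ("GAA", "E"), ("GAG", "E"),
  ("TGT", "C"), ("TGC", "C"), ("TGA", "X"), ("TGG", "W"),
  ("CGT", "R"), ("CGC", "R"), ("CGA", "R"), ("CGG", "R"),
  ("AGT", "S"), ("AGC", "S"), ("AGA", "R"), ("AGG", "R"),
  ("GGT", "G"), ("GGC", "G"), ("GGA", "G"), ("GGG", "G")]

-- translate_dna: the append-loop over range(0, len-2, 3) and ''.join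
def pvTranslateDna (seq : String) : String :=
  let s := PySem.Str.upper seq
  let protein : List String :=
    (PySem.List.pyRange 0 (PySem.Str.len s - 2) 3).foldl
      (fun acc i =>
        acc ++ [PySem.Dict.getD pvCodonTable (PySem.Str.slice s (some i) (some (i + 3))) "?"]) []
  PySem.Str.join "" protein

-- the 'for i in range(min_len): … break / else:' loop (returns the break index, none = no break)
def pvFirstDiffLoop (w v : String) : List Int → Option Int
  | [] => none
  | i :: rest =>
    if PySem.Str.pyGet? w i ≠ PySem.Str.pyGet? v i then some i else pvFirstDiffLoop w v rest

-- the 'for i in range(first_diff, len(var_protein)): … break' stop-codon loop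
def pvStopLoop (v : String) : List Int → Option Int
  | [] => none
  | i :: rest =>
    if PySem.Str.pyGet? v i = some 'X' then some i else pvStopLoop v rest

-- one-char string s[i] (index always in range where A uses it; "?" branch is Python's
-- 'wt_protein[0] if wt_protein else '?'' — for the plain s[idx] uses the index is in range)
def pvHeadOr (s : String) (i : Int) : String :=
  match PySem.Str.pyGet? s i with
  | some c => String.ofList [c]
  | none => "?"

-- everything of A after wt_protein / var_full are built (straight transliteration continues)
def pvFsTailA (wt_protein : String) (var_full : String) (varpos : Int) : String :=
  let var_protein := pvTranslateDna var_full
  if var_protein = "" then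
    "p." ++ pvHeadOr wt_protein 0 ++ PySem.Int.toStr varpos ++ "fs"
  else
    let min_len := min (PySem.Str.len wt_protein) (PySem.Str.len var_protein)
    let first_diff :=
      (pvFirstDiffLoop wt_protein var_protein (PySem.List.pyRange 0 min_len 1)).getD min_len
    if first_diff ≥ PySem.Str.len wt_protein ∨ first_diff ≥ PySem.Str.len var_protein then
      "p." ++ pvHeadOr wt_protein 0 ++ PySem.Int.toStr varpos ++ "fs"
    else
      let diff_wt_aa := pvHeadOr wt_protein first_diff
      let diff_var_aa := pvHeadOr var_protein first_diff
      let diff_pos := varpos + first_diff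
      match pvStopLoop var_protein (PySem.List.pyRange first_diff (PySem.Str.len var_protein) 1) with
      | some i =>
          "p." ++ diff_wt_aa ++ PySem.Int.toStr diff_pos ++ diff_var_aa ++ "fs*" ++
            PySem.Int.toStr (i - first_diff + 1)
      | none =>
          "p." ++ diff_wt_aa ++ PySem.Int.toStr diff_pos ++ diff_var_aa ++ "fs"

def compute_fs_annotation_py (mrna_seq : String) (refvarstart : Int) (refcdsstart : Int) (varnt3 : String) (fs : Int) (is_del : Bool) (refvarend : Option Int) : String :=
  let wt_codon_start := refvarstart - fs - 1
  let varpos := PySem.Int.floordiv (refvarstart - refcdsstart) 3 + 1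
  let max_len := min (PySem.Str.len mrna_seq) (wt_codon_start + 3000)
  let wt_seq := PySem.Str.slice mrna_seq (some wt_codon_start) (some max_len)
  let wt_protein := pvTranslateDna wt_seq
  let var_full :=
    if is_del then
      let refvarend' := refvarend.getD refvarstart
      let pre :=
        if fs > 0 then PySem.Str.slice mrna_seq (some wt_codon_start) (some (wt_codon_start + fs))
        else ""
      pre ++ PySem.Str.slice mrna_seq (some refvarend') (some max_len)
    else
      varnt3 ++ PySem.Str.slice mrna_seq (some (wt_codon_start + 3)) (some max_len)
  pvFsTailA wt_protein var_full varpos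

-- ===== PORT B =====
-- _aa: amino acid of the k-th complete codon of an (already uppercased) window
def pvAa (seq : String) (k : Int) : String :=
  PySem.Dict.getD pvCodonTable (PySem.Str.slice seq (some (3 * k)) (some (3 * k + 3))) "?"

-- 'while p < n_wt and p < n_var and _aa(wt,p) == _aa(var,p): p += 1'
def pvScanDiff (wt var : String) (nWt nVar p : Int) : Int :=
  if h : p < nWt ∧ p < nVar ∧ pvAa wt p = pvAa var p then
    pvScanDiff wt var nWt nVar (p + 1)
  else p
  termination_by (nWt - p).toNat
  decreasing_by omega

-- 'while k < n_var and _aa(var,k) != 'X': k += 1'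
def pvScanStop (var : String) (nVar k : Int) : Int :=
  if h : k < nVar ∧ pvAa var k ≠ "X" then pvScanStop var nVar (k + 1) else k
  termination_by (nVar - k).toNat
  decreasing_by omega

-- everything of B after the wt window / raw var window are built
def pvFsTailB (wt : String) (varRaw : String) (varpos : Int) : String :=
  let var := PySem.Str.upper varRaw
  let nWt := PySem.Int.floordiv (PySem.Str.len wt) 3
  let nVar := PySem.Int.floordiv (PySem.Str.len var) 3
  let p := pvScanDiff wt var nWt nVar 0
  if p ≥ nWt ∨ p ≥ nVar then
    "p." ++ (if nWt > 0 then pvAa wt 0 else "?") ++ PySem.Int.toStr varpos ++ "fs"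
  else
    let wtAa := pvAa wt p
    let varAa := pvAa var p
    let k := pvScanStop var nVar p
    if k < nVar then
      "p." ++ wtAa ++ PySem.Int.toStr (varpos + p) ++ varAa ++ "fs*" ++
        PySem.Int.toStr (k - p + 1)
    else
      "p." ++ wtAa ++ PySem.Int.toStr (varpos + p) ++ varAa ++ "fs"

def compute_fs_annotation_py_alt (mrna_seq : String) (refvarstart : Int) (refcdsstart : Int) (varnt3 : String) (fs : Int) (is_del : Bool) (refvarend : Option Int) : String :=
  let wt_codon_start := refvarstart - fs - 1
  let varpos := PySem.Int.floordiv (refvarstart - refcdsstart) 3 + 1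
  let max_len := min (PySem.Str.len mrna_seq) (wt_codon_start + 3000)
  let wt := PySem.Str.upper (PySem.Str.slice mrna_seq (some wt_codon_start) (some max_len))
  let varRaw :=
    if is_del then
      let refvarend' := refvarend.getD refvarstart
      let pre :=
        if fs > 0 then PySem.Str.slice mrna_seq (some wt_codon_start) (some (wt_codon_start + fs))
        else ""
      pre ++ PySem.Str.slice mrna_seq (some refvarend') (some max_len)
    else
      varnt3 ++ PySem.Str.slice mrna_seq (some (wt_codon_start + 3)) (some max_len)
  pvFsTailB wt varRaw varpos

-- ===== PRECONDITION & SPEC =====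
def Spec_compute_fs_annotation_py (mrna_seq : String) (refvarstart : Int) (refcdsstart : Int) (varnt3 : String) (fs : Int) (is_del : Bool) (refvarend : Option Int) (out : String) : Prop := out = compute_fs_annotation_py_alt mrna_seq refvarstart refcdsstart varnt3 fs is_del refvarend
instance (mrna_seq : String) (refvarstart : Int) (refcdsstart : Int) (varnt3 : String) (fs : Int) (is_del : Bool) (refvarend : Option Int) (out : String) : Decidable (Spec_compute_fs_annotation_py mrna_seq refvarstart refcdsstart varnt3 fs is_del refvarend out) := by unfold Spec_compute_fs_annotation_py; infer_instance

-- ===== CLAIM (what is proved, stated in full; the proofs are below) =====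
def Claim_equal_compute_fs_annotation_py : Prop := ∀ (mrna_seq : String) (refvarstart : Int) (refcdsstart : Int) (varnt3 : String) (fs : Int) (is_del : Bool) (refvarend : Option Int), Dom_compute_fs_annotation_py mrna_seq refvarstart refcdsstart varnt3 fs is_del refvarend → Spec_compute_fs_annotation_py mrna_seq refvarstart refcdsstart varnt3 fs is_del refvarend (compute_fs_annotation_py mrna_seq refvarstart refcdsstart varnt3 fs is_del refvarend)

-- ===== LEMMAS AND PROOFS =====

-- proof-side views: the k-th amino acid as a 1-character string / as its character
def pvC (s : String) (k : Nat) : Char := (pvAa s (k : Int)).toList.headD '?'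

lemma pv_find?_congr {α : Type} (l : List α) (p q : α → Bool) (h : ∀ x ∈ l, p x = q x) :
    l.find? p = l.find? q := by
  induction l with
  | nil => rfl
  | cons a t ih =>
    simp only [List.find?]
    rw [h a (by simp)]
    cases q a
    · exact ih (fun x hx => h x (by simp [hx]))
    · rfl

set_option maxRecDepth 16384 in
lemma pv_single (key : String) :
    ∃ c, PySem.Dict.getD pvCodonTable key "?" = String.ofList [c] := by
  unfold PySem.Dict.getD
  cases h : pvCodonTable.get? key with
  | none =>
    exact ⟨'?', by decide⟩
  | some v =>
    have hv : v ∈ pvCodonTable.values := by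
      unfold PySem.Dict.get? at h
      rcases Option.map_eq_some_iff.mp h with ⟨p, hp, hv⟩
      have := List.mem_of_find?_eq_some hp
      subst hv
      exact List.mem_map_of_mem this
    have hl : ∀ w ∈ pvCodonTable.values, w.toList.length = 1 := by decide
    rcases List.length_eq_one_iff.mp (hl v hv) with ⟨c, hc⟩
    refine ⟨c, ?_⟩
    rw [← hc, String.ofList_toList]
    rfl

lemma pvAa_eq_ofList (s : String) (k : Nat) : pvAa s (k : Int) = String.ofList [pvC s k] := by
  rcases pv_single (PySem.Str.slice s (some (3 * (k : Int))) (some (3 * (k : Int) + 3))) with ⟨c, hc⟩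
  have h2 : pvAa s (k : Int) = String.ofList [c] := hc
  unfold pvC
  rw [h2, String.toList_ofList]
  rfl

lemma pvAa_eq_iff (s t : String) (k j : Nat) :
    (pvAa s (k : Int) = pvAa t (j : Int)) ↔ pvC s k = pvC t j := by
  rw [pvAa_eq_ofList, pvAa_eq_ofList]
  constructor
  · intro h
    have := congrArg String.toList h
    simpa using this
  · intro h; rw [h]

lemma pvAa_eq_X_iff (s : String) (k : Nat) : (pvAa s (k : Int) = "X") ↔ pvC s k = 'X' := by
  have hX : ("X" : String) = String.ofList ['X'] := by decide
  rw [pvAa_eq_ofList, hX]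
  constructor
  · intro h
    have := congrArg String.toList h
    simpa using this
  · intro h; rw [h]

-- translate_dna produces exactly the map of pvC over the complete codons
set_option maxRecDepth 16384 in
lemma pv_translate_toList (seq : String) :
    (pvTranslateDna seq).toList =
      (List.range ((PySem.Str.upper seq).toList.length / 3)).map (pvC (PySem.Str.upper seq)) := by
  simp only [pvTranslateDna]
  set s := PySem.Str.upper seq with hs
  set n : Nat := s.toList.length with hn
  have hlen : PySem.Str.len s = (n : Int) := by rw [PySem.Str.len_eq]
  have hrange : PySem.List.pyRange 0 ((n : Int) - 2) 3 =
      (List.range (n / 3)).map (fun k : Nat => ((3 * k : Nat) : Int)) := by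
    rw [PySem.List.pyRange_of_pos 0 ((n : Int) - 2) (by norm_num)]
    have hcount : (if (0 : Int) < (n : Int) - 2 then (((n : Int) - 2 - 0 + 3 - 1) / 3).toNat else 0)
        = n / 3 := by split <;> omega
    rw [hcount]
    apply List.map_congr_left
    intro k _
    push_cast
    ring
  rw [hlen, hrange, PySem.List.foldl_append_singleton_eq_map]
  simp only [List.nil_append, List.map_map, PySem.Str.toList_join]
  have hstep : List.map
      (String.toList ∘ (fun i => pvCodonTable.getD (PySem.Str.slice s (some i) (some (i + 3))) "?")
        ∘ fun k : Nat => ((3 * k : Nat) : Int)) (List.range (n / 3))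
      = List.map (fun k : Nat => [pvC s k]) (List.range (n / 3)) := by
    apply List.map_congr_left
    intro k _
    have h2 := pvAa_eq_ofList s k
    unfold pvAa at h2
    have h3 : ((3 * k : Nat) : Int) = 3 * (k : Int) := by push_cast; ring
    show String.toList (pvCodonTable.getD
      (PySem.Str.slice s (some ((3 * k : Nat) : Int)) (some (((3 * k : Nat) : Int) + 3))) "?")
      = [pvC s k]
    rw [h3]
    rw [h2, String.toList_ofList]
  rw [hstep]
  have hone : (fun k : Nat => [pvC s k]) = (fun c => [c]) ∘ pvC s := rfl
  rw [hone, ← List.map_map]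
  have hjoin : ("" : String).toList = ([] : List Char) := by decide
  rw [hjoin]
  exact PySem.Chars.join_nil_singletons _

-- A's break-loops are find?
lemma pvFirstDiffLoop_eq (w v : String) (l : List Int) :
    pvFirstDiffLoop w v l =
      l.find? (fun i => decide (PySem.Str.pyGet? w i ≠ PySem.Str.pyGet? v i)) := by
  induction l with
  | nil => rfl
  | cons i rest ih =>
    simp only [pvFirstDiffLoop, List.find?]
    split
    · simp_all
    · simp_all

lemma pvStopLoop_eq (v : String) (l : List Int) :
    pvStopLoop v l = l.find? (fun i => decide (PySem.Str.pyGet? v i = some 'X')) := by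
  induction l with
  | nil => rfl
  | cons i rest ih =>
    simp only [pvStopLoop, List.find?]
    split
    · simp_all
    · simp_all

-- B's while-loops are find? over the remaining index segment
set_option maxRecDepth 4096 in
lemma pvScanDiff_eq (wt var : String) (m1 m2 : Nat) :
    ∀ (n j : Nat), j + n = min m1 m2 →
      pvScanDiff wt var (m1 : Int) (m2 : Int) (j : Int) =
        ((((List.range' j n).find?
            (fun k : Nat => decide (pvAa wt (k : Int) ≠ pvAa var (k : Int)))).getD (min m1 m2) : Nat) : Int) := by
  intro n
  induction n with
  | zero =>
    intro j hj
    rw [pvScanDiff]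
    rw [dif_neg (by omega)]
    simp; omega
  | succ n ih =>
    intro j hj
    rw [pvScanDiff]
    rw [List.range'_succ]
    by_cases heq : pvAa wt (j : Int) = pvAa var (j : Int)
    · rw [dif_pos ⟨by omega, by omega, heq⟩]
      have : ((j : Int) + 1) = ((j + 1 : Nat) : Int) := by push_cast; ring
      rw [this, ih (j + 1) (by omega)]
      simp [List.find?, heq]
    · rw [dif_neg (by tauto)]
      simp [List.find?, heq]

set_option maxRecDepth 4096 in
lemma pvScanStop_eq (var : String) (m2 : Nat) :
    ∀ (n j : Nat), j + n = m2 →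
      pvScanStop var (m2 : Int) (j : Int) =
        ((((List.range' j n).find?
            (fun k : Nat => decide (pvAa var (k : Int) = "X"))).getD m2 : Nat) : Int) := by
  intro n
  induction n with
  | zero =>
    intro j hj
    rw [pvScanStop]
    rw [dif_neg (by omega)]
    simp; omega
  | succ n ih =>
    intro j hj
    rw [pvScanStop]
    rw [List.range'_succ]
    by_cases heq : pvAa var (j : Int) = "X"
    · rw [dif_neg (by tauto)]
      simp [List.find?, heq]
    · rw [dif_pos ⟨by omega, heq⟩]
      have : ((j : Int) + 1) = ((j + 1 : Nat) : Int) := by push_cast; ring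
      rw [this, ih (j + 1) (by omega)]
      simp [List.find?, heq]

-- the central lemma: A's tail on (wt window, raw var window) equals B's tail
set_option maxRecDepth 16384 in
set_option maxHeartbeats 1000000 in
lemma pv_tail_eq (w v : String) (vp : Int) :
    pvFsTailA (pvTranslateDna w) v vp = pvFsTailB (PySem.Str.upper w) v vp := by
  have hw := pv_translate_toList w
  have hv := pv_translate_toList v
  set s1 := PySem.Str.upper w with hs1
  set s2 := PySem.Str.upper v with hs2
  set m1 : Nat := s1.toList.length / 3 with hm1
  set m2 : Nat := s2.toList.length / 3 with hm2
  set wtp := pvTranslateDna w with hwtp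
  set vtp := pvTranslateDna v with hvtp
  have hlw : PySem.Str.len wtp = (m1 : Int) := by rw [PySem.Str.len_eq, hw]; simp
  have hlv : PySem.Str.len vtp = (m2 : Int) := by rw [PySem.Str.len_eq, hv]; simp
  have hnw : PySem.Int.floordiv (PySem.Str.len s1) 3 = (m1 : Int) := by
    rw [PySem.Str.len_eq]
    exact_mod_cast PySem.Int.floordiv_natCast s1.toList.length 3
  have hnv : PySem.Int.floordiv (PySem.Str.len s2) 3 = (m2 : Int) := by
    rw [PySem.Str.len_eq]
    exact_mod_cast PySem.Int.floordiv_natCast s2.toList.length 3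
  clear_value s1 s2 m1 m2 wtp vtp
  have hhead : pvHeadOr wtp 0 = (if (m1 : Int) > 0 then pvAa s1 0 else "?") := by
    unfold pvHeadOr
    have h0 : PySem.Str.pyGet? wtp 0 = ((List.range m1).map (pvC s1))[0]? := by
      rw [show (0:Int) = ((0:Nat):Int) from rfl, PySem.Str.pyGet?_natCast, hw]
    cases hm : m1 with
    | zero => rw [h0, hm]; simp
    | succ t =>
      rw [h0]
      have hsome : ((List.range m1).map (pvC s1))[0]? = some (pvC s1 0) := by
        rw [List.getElem?_map]
        rw [List.getElem?_range (by omega)]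
        rfl
      rw [hsome]
      show String.ofList [pvC s1 0] = if ((t + 1 : Nat) : Int) > 0 then pvAa s1 0 else "?"
      rw [if_pos (by exact_mod_cast Nat.succ_pos t)]
      have h2 := pvAa_eq_ofList s1 0
      simp only [Nat.cast_zero] at h2
      exact h2.symm
  set pA : Nat → Bool := fun k => decide (pvC s1 k ≠ pvC s2 k) with hpA
  set fd? := (List.range (min m1 m2)).find? pA with hfdq
  have hAfd : pvFirstDiffLoop wtp vtp (PySem.List.pyRange 0 (min ((m1:Nat):Int) ((m2:Nat):Int)) 1)
      = fd?.map (fun k : Nat => (k : Int)) := by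
    rw [← Nat.cast_min, pvFirstDiffLoop_eq, PySem.List.pyRange_one]
    simp only [sub_zero, Int.toNat_natCast, zero_add]
    rw [List.find?_map]
    rw [hfdq]
    refine congrArg (Option.map (fun k : Nat => (k : Int))) ?_
    apply pv_find?_congr
    intro k hk
    have hk' : k < min m1 m2 := List.mem_range.mp hk
    simp only [Function.comp]
    rw [PySem.Str.pyGet?_natCast, PySem.Str.pyGet?_natCast, hw, hv]
    rw [List.getElem?_map, List.getElem?_map]
    rw [List.getElem?_range (by omega), List.getElem?_range (by omega)]
    simp [hpA]
  have hBp : pvScanDiff s1 s2 (m1:Int) (m2:Int) 0 = ((fd?.getD (min m1 m2) : Nat) : Int) := by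
    have h := pvScanDiff_eq s1 s2 m1 m2 (min m1 m2) 0 (by omega)
    simp only [Nat.cast_zero] at h
    rw [h]
    have hr : (List.range' 0 (min m1 m2)).find?
        (fun k : Nat => decide (pvAa s1 (k : Int) ≠ pvAa s2 (k : Int))) = fd? := by
      rw [← List.range_eq_range', hfdq]
      apply pv_find?_congr
      intro k _
      simp [hpA, pvAa_eq_iff]
    rw [hr]
  -- now unfold both tails and rewrite
  simp only [pvFsTailA, pvFsTailB]
  rw [← hvtp, ← hs2]
  rw [hlw]
  rw [hlv]
  rw [hnw]
  rw [hnv]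
  rw [hAfd]
  rw [hBp]
  cases hfd : fd? with
  | none =>
    simp only [Option.map_none, Option.getD_none]
    have hge : ((min m1 m2 : Nat) : Int) ≥ (m1:Int) ∨ ((min m1 m2 : Nat) : Int) ≥ (m2:Int) := by
      push_cast; omega
    rw [if_pos (by push_cast at hge ⊢; omega : ((min m1 m2 : Nat):Int) ≥ (m1:Int) ∨ ((min m1 m2 : Nat):Int) ≥ (m2:Int))]
    by_cases hv0 : vtp = ""
    · rw [if_pos hv0, hhead]
    · rw [if_neg hv0]
      rw [if_pos (by rw [← Nat.cast_min]; exact hge)]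
      rw [hhead]
  | some k0 =>
    simp only [Option.map_some, Option.getD_some]
    have hk0 : k0 < min m1 m2 := by
      have := List.mem_of_find?_eq_some (hfdq ▸ hfd)
      exact List.mem_range.mp this
    have hvne : vtp ≠ "" := by
      intro h0
      have : vtp.toList = [] := by rw [h0]; rfl
      rw [hv] at this
      have := List.map_eq_nil_iff.mp this
      have := List.range_eq_nil.mp this
      omega
    rw [if_neg hvne]
    rw [if_neg (by omega : ¬ ((k0:Int) ≥ (m1:Int) ∨ (k0:Int) ≥ (m2:Int)))]
    rw [if_neg (by omega : ¬ ((k0:Int) ≥ (m1:Int) ∨ (k0:Int) ≥ (m2:Int)))]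
    -- amino-acid strings at the mismatch
    have haaW : pvHeadOr wtp (k0:Int) = pvAa s1 (k0:Int) := by
      unfold pvHeadOr
      rw [PySem.Str.pyGet?_natCast, hw, List.getElem?_map, List.getElem?_range (by omega)]
      simp only [Option.map_some]
      rw [(pvAa_eq_ofList s1 k0).symm]
    have haaV : pvHeadOr vtp (k0:Int) = pvAa s2 (k0:Int) := by
      unfold pvHeadOr
      rw [PySem.Str.pyGet?_natCast, hv, List.getElem?_map, List.getElem?_range (by omega)]
      simp only [Option.map_some]
      rw [(pvAa_eq_ofList s2 k0).symm]
    rw [haaW, haaV]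
    set t? := (List.range (m2 - k0)).find? (fun t : Nat => decide (pvC s2 (k0 + t) = 'X')) with htq
    have hstop : pvStopLoop vtp (PySem.List.pyRange (k0:Int) ((m2:Nat):Int) 1)
        = t?.map (fun t : Nat => ((k0:Int) + (t:Int))) := by
      rw [pvStopLoop_eq, PySem.List.pyRange_one]
      have : ((m2:Int) - (k0:Int)).toNat = m2 - k0 := by omega
      rw [this, List.find?_map, htq]
      refine congrArg (Option.map fun t : Nat => (k0 : Int) + (t : Int)) ?_
      apply pv_find?_congr
      intro t ht
      have ht' : t < m2 - k0 := List.mem_range.mp ht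
      have hcast : ((k0:Int) + (t:Int)) = ((k0 + t : Nat) : Int) := by push_cast; ring
      show decide (PySem.Str.pyGet? vtp ((k0:Int) + (t:Int)) = some 'X')
        = decide (pvC s2 (k0 + t) = 'X')
      rw [hcast, PySem.Str.pyGet?_natCast, hv, List.getElem?_map,
        List.getElem?_range (by omega)]
      simp
    have hBk : pvScanStop s2 ((m2:Nat):Int) (k0:Int)
        = (((t?.map (fun t => k0 + t)).getD m2 : Nat) : Int) := by
      have h := pvScanStop_eq s2 m2 (m2 - k0) k0 (by omega)
      rw [h, List.range'_eq_map_range, List.find?_map]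
      have hpred : (List.range (m2 - k0)).find?
          ((fun k : Nat => decide (pvAa s2 (k : Int) = "X")) ∘ fun x => k0 + x)
          = t? := by
        rw [htq]
        apply pv_find?_congr
        intro t _
        show decide (pvAa s2 ((k0 + t : Nat) : Int) = "X") = decide (pvC s2 (k0 + t) = 'X')
        simp only [pvAa_eq_X_iff]
      rw [hpred]
    rw [hstop, hBk]
    cases ht : t? with
    | none =>
      simp only [Option.map_none, Option.getD_none]
      rw [if_neg (by omega : ¬ ((m2:Int) < (m2:Int)))]
    | some t0 =>
      have ht0 : t0 < m2 - k0 := by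
        have := List.mem_of_find?_eq_some (htq ▸ ht)
        exact List.mem_range.mp this
      simp only [Option.map_some, Option.getD_some]
      rw [if_pos (by push_cast; omega : ((k0 + t0 : Nat):Int) < (m2:Int))]
      have : ((k0 + t0 : Nat) : Int) - (k0:Int) + 1 = (k0:Int) + (t0:Int) - (k0:Int) + 1 := by
        push_cast; ring
      rw [this]

-- ===== VERDICT (by name: the statement is the Claim_ definition above) =====
theorem compute_fs_annotation_py_spec : Claim_equal_compute_fs_annotation_py := by
  intro mrna_seq refvarstart refcdsstart varnt3 fs is_del refvarend _hdom
  unfold Spec_compute_fs_annotation_py compute_fs_annotation_py compute_fs_annotation_py_alt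
  cases is_del <;> exact pv_tail_eq _ _ _
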